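-- pv_equiv track=rewrite | github.com/abhinavsaraswatt/plag_check | main.py | split_text_by_dot
-- ===== SOURCE A (Python) =====
-- def split_text_by_dot(text, max_words=30):
--     words = text.split()  # Split the text into individual words
--     lines = []  # List to store the split text
--     current_line = []  # Temporary storage for the current line's words
--
--     for word in words:
--         current_line.append(word)
--
--         # If the current line reaches max_words
--         if len(current_line) == max_words:
--             # Check if the last word ends with a dot
--             if current_line[-1].endswith('.'):
--                 lines.append(' '.join(current_line))
--                 current_line = []
--             else:
--                 # Find the last word with a dot in the current_line
--                 last_dot_index = -1
--                 for i in range(len(current_line)):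
--                     if current_line[i].endswith('.'):
--                         last_dot_index = i
--
--                 if last_dot_index != -1:  # If there's a word with a dot
--                     lines.append(' '.join(current_line[:last_dot_index + 1]))
--                     current_line = current_line[last_dot_index + 1:]  # Retain leftover words
--                 else:
--                     # If no dot is found, keep the line as it is
--                     lines.append(' '.join(current_line))
--                     current_line = []
--
--     # Append any remaining words as the final line
--     if current_line:
--         lines.append(' '.join(current_line))
--
--     return lines
-- ===== SOURCE B (Python) =====
-- def split_text_by_dot(text, max_words=30):
--     # Different decomposition: instead of accumulating words one at a time,
--     # repeatedly bite off the first max_words words as a chunk, cut the chunk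
--     # after its last dot-ending word (backward scan with break), and push the
--     # leftover back onto the remaining words.
--     words = text.split()
--     if max_words < 1:
--         # the word limit can never be hit; the whole text is one line
--         return [' '.join(words)] if words else []
--     lines = []
--     while len(words) >= max_words:
--         chunk, words = words[:max_words], words[max_words:]
--         cut = max_words
--         for i in range(max_words - 1, -1, -1):
--             if chunk[i].endswith('.'):
--                 cut = i + 1
--                 break
--         lines.append(' '.join(chunk[:cut]))
--         words = chunk[cut:] + words
--     if words:
--         lines.append(' '.join(words))
--     return lines
-- ===== Notes on version B (the rewrite author's own statement) =====
-- stated objective: alternative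
-- what changed: B replaces A's word-by-word accumulation with state by a chunking loop: it repeatedly slices the first max_words words off the remaining list, cuts the chunk after its last dot-ending word found by a backward scan with break, and pushes the leftover back onto the remaining words.
import Mathlib
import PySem

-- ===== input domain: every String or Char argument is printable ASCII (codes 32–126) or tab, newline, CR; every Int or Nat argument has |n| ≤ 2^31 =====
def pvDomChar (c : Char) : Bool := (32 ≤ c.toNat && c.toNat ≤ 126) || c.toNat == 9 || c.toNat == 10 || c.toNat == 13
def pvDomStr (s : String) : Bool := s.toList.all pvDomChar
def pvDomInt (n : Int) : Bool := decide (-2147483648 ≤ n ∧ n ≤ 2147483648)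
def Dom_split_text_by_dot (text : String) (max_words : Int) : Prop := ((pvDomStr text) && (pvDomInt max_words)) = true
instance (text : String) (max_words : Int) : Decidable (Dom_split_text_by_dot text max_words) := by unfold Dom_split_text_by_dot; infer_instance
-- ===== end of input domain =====

-- B replaces A's word-by-word accumulation by a chunking loop over the remaining
-- word list (slice off max_words words, cut after the last dot via a backward scan
-- with break, push the leftover back); objective: alternative decomposition.

-- ===== PORT A =====
-- A's inner scan: for i in range(len(current_line)): if current_line[i].endswith('.'): last_dot_index = i
def lastDotScanA (cl : List String) : Int :=
  (PySem.List.pyRange 0 (cl.length : Int) 1).foldl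
    (fun ldi i => if PySem.Str.endswith (cl.getD i.toNat "") "." then i else ldi) (-1)

-- the body of A's for-loop over words; state = (lines, current_line)
def stepA (max_words : Int) (st : List String × List String) (word : String) :
    List String × List String :=
  let cl := st.2 ++ [word]
  if (cl.length : Int) = max_words then
    -- current_line[-1] is exactly the word just appended
    if PySem.Str.endswith word "." then (st.1 ++ [PySem.Str.join " " cl], [])
    else
      let ldi := lastDotScanA cl
      if ldi ≠ -1 then
        (st.1 ++ [PySem.Str.join " " (PySem.List.slice cl none (some (ldi + 1)))],
         PySem.List.slice cl (some (ldi + 1)) none)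
      else (st.1 ++ [PySem.Str.join " " cl], [])
  else (st.1, cl)

def split_text_by_dot (text : String) (max_words : Int) : List String :=
  let st := (PySem.Str.split₀ text).foldl (stepA max_words) ([], [])
  if st.2 ≠ [] then st.1 ++ [PySem.Str.join " " st.2] else st.1

-- ===== PORT B =====
-- B's backward scan with break: cut = max_words; for i in range(max_words-1,-1,-1): if chunk[i].endswith('.'): cut=i+1; break
-- (n counts how many indices remain to inspect; chunk[i] with 0 ≤ i < len is exact as getD)
def cutScanB (chunk : List String) (mw : Int) : Nat → Int
  | 0 => mw
  | n + 1 =>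
    if PySem.Str.endswith (chunk.getD n "") "." then (n : Int) + 1
    else cutScanB chunk mw n

-- B's while-loop: while len(words) >= max_words: …  (fuel = initial word count; each
-- iteration removes cut ≥ 1 words, so the fuel is never exhausted while the guard holds)
def loopB (mw : Int) : Nat → List String → List String → List String
  | 0, words, lines =>
    if words ≠ [] then lines ++ [PySem.Str.join " " words] else lines
  | fuel + 1, words, lines =>
    if mw ≤ (words.length : Int) then
      let chunk := PySem.List.slice words none (some mw)
      let rest := PySem.List.slice words (some mw) none
      let cut := cutScanB chunk mw mw.toNat
      loopB mw fuel (PySem.List.slice chunk (some cut) none ++ rest)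
        (lines ++ [PySem.Str.join " " (PySem.List.slice chunk none (some cut))])
    else if words ≠ [] then lines ++ [PySem.Str.join " " words] else lines

def split_text_by_dot_alt (text : String) (max_words : Int) : List String :=
  let words := PySem.Str.split₀ text
  if max_words < 1 then (if words ≠ [] then [PySem.Str.join " " words] else [])
  else loopB max_words words.length words []

-- ===== PRECONDITION & SPEC =====
def Spec_split_text_by_dot (text : String) (max_words : Int) (out : List String) : Prop := out = split_text_by_dot_alt text max_words
instance (text : String) (max_words : Int) (out : List String) : Decidable (Spec_split_text_by_dot text max_words out) := by unfold Spec_split_text_by_dot; infer_instance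

-- ===== CLAIM (what is proved, stated in full; the proofs are below) =====
def Claim_equal_split_text_by_dot : Prop := ∀ (text : String) (max_words : Int), Dom_split_text_by_dot text max_words → Spec_split_text_by_dot text max_words (split_text_by_dot text max_words)

-- ===== LEMMAS AND PROOFS =====

theorem lastDotScanA_nil : lastDotScanA [] = -1 := by decide

theorem lastDotScanA_append (cl : List String) (w : String) :
    lastDotScanA (cl ++ [w]) =
      if PySem.Str.endswith w "." then (cl.length : Int) else lastDotScanA cl := by
  unfold lastDotScanA
  have hlen : ((cl ++ [w]).length : Int) = (cl.length : Int) + 1 := by simp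
  rw [hlen, PySem.List.pyRange_one_succ_right (by positivity), List.foldl_append]
  have hcongr : (PySem.List.pyRange 0 (cl.length : Int) 1).foldl
      (fun ldi i => if PySem.Str.endswith ((cl ++ [w]).getD i.toNat "") "." then i else ldi) (-1)
      = (PySem.List.pyRange 0 (cl.length : Int) 1).foldl
      (fun ldi i => if PySem.Str.endswith (cl.getD i.toNat "") "." then i else ldi) (-1) := by
    apply PySem.List.foldl_congr_mem
    intro acc i hi
    rw [PySem.List.mem_pyRange_one] at hi
    have : i.toNat < cl.length := by omega
    rw [List.getD_append _ _ _ _ this]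
  rw [hcongr]
  simp only [List.foldl_cons, List.foldl_nil]
  have : ((cl.length : Int)).toNat = cl.length := by omega
  rw [this, List.getD_append_right _ _ _ _ (le_refl _)]
  simp

theorem lastDotScanA_bounds (cl : List String) :
    -1 ≤ lastDotScanA cl ∧ lastDotScanA cl < (cl.length : Int) := by
  induction cl using List.reverseRecOn with
  | nil => decide
  | append_singleton cl w ih =>
    rw [lastDotScanA_append]
    simp only [List.length_append, List.length_singleton]
    split_ifs <;> push_cast <;> omega

theorem cutScanB_congr (cl : List String) (w : String) (mw : Int) :
    ∀ n, n ≤ cl.length → cutScanB (cl ++ [w]) mw n = cutScanB cl mw n := by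
  intro n
  induction n with
  | zero => intro _; rfl
  | succ n ih =>
    intro hn
    unfold cutScanB
    rw [List.getD_append _ _ _ _ (by omega), ih (by omega)]

-- B's backward break-scan finds exactly A's last dot index
theorem cutScanB_spec (chunk : List String) (mw : Int) :
    cutScanB chunk mw chunk.length =
      if lastDotScanA chunk = -1 then mw else lastDotScanA chunk + 1 := by
  induction chunk using List.reverseRecOn with
  | nil => simp [cutScanB, lastDotScanA_nil]
  | append_singleton cl w ih =>
    have hlen : (cl ++ [w]).length = cl.length + 1 := by simp
    rw [hlen]
    unfold cutScanB
    rw [List.getD_append_right _ _ _ _ (le_refl _), lastDotScanA_append]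
    simp only [Nat.sub_self, List.getD_cons_zero]
    by_cases hw : PySem.Str.endswith w "." = true
    · rw [if_pos hw, if_pos hw, if_neg (by have := lastDotScanA_bounds cl; omega)]
    · rw [if_neg hw, if_neg hw, cutScanB_congr cl w mw cl.length (le_refl _), ih]

-- while current_line stays short of max_words, A just accumulates
theorem innerA (mw : Int) :
    ∀ (ws cl lines : List String),
      ((cl.length : Int) + ws.length < mw ∨ mw < 1) →
      ws.foldl (stepA mw) (lines, cl) = (lines, cl ++ ws) := by
  intro ws
  induction ws with
  | nil => intro cl lines _; simp
  | cons w t ih =>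
    intro cl lines h
    have hne : ((cl ++ [w]).length : Int) ≠ mw := by
      rcases h with h | h <;>
        · simp only [List.length_append, List.length_cons, List.length_nil] at h ⊢
          push_cast at h ⊢
          omega
    simp only [List.foldl_cons]
    rw [show stepA mw (lines, cl) w = (lines, cl ++ [w]) by
      simp only [stepA]; rw [if_neg hne]]
    rw [ih (cl ++ [w]) lines (by
      rcases h with h | h
      · left
        simp only [List.length_append, List.length_cons, List.length_nil] at h ⊢
        push_cast at h ⊢
        omega
      · right; exact h)]
    simp

-- the moment current_line hits max_words, A emits chunk.take cut and keeps chunk.drop cut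
theorem triggerA (mw : Int) (cl : List String) (w : String) (lines : List String)
    (h : ((cl ++ [w]).length : Int) = mw) :
    stepA mw (lines, cl) w =
      (lines ++ [PySem.Str.join " " ((cl ++ [w]).take (cutScanB (cl ++ [w]) mw (cl ++ [w]).length).toNat)],
       (cl ++ [w]).drop (cutScanB (cl ++ [w]) mw (cl ++ [w]).length).toNat) := by
  have hspec := cutScanB_spec (cl ++ [w]) mw
  have hb := lastDotScanA_bounds (cl ++ [w])
  simp only [stepA]
  rw [if_pos h]
  by_cases hw : PySem.Str.endswith w "." = true
  · rw [if_pos hw]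
    have hL : lastDotScanA (cl ++ [w]) = (cl.length : Int) := by
      rw [lastDotScanA_append, if_pos hw]
    have hcut : cutScanB (cl ++ [w]) mw (cl ++ [w]).length = ((cl ++ [w]).length : Int) := by
      rw [hspec, if_neg (by omega), hL]
      simp
    rw [hcut, Int.toNat_natCast, List.take_length, List.drop_length]
  · rw [if_neg hw]
    by_cases hL : lastDotScanA (cl ++ [w]) ≠ -1
    · rw [if_pos hL]
      have h0 : 0 ≤ lastDotScanA (cl ++ [w]) := by omega
      have hcut : cutScanB (cl ++ [w]) mw (cl ++ [w]).length = lastDotScanA (cl ++ [w]) + 1 := by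
        rw [hspec, if_neg (by omega)]
      rw [hcut, PySem.List.slice_to _ (by omega), PySem.List.slice_from _ (by omega)]
    · rw [if_neg hL]
      simp only [ne_eq, not_not] at hL
      have hcut : cutScanB (cl ++ [w]) mw (cl ++ [w]).length = ((cl ++ [w]).length : Int) := by
        rw [hspec, if_pos hL, ← h]
      rw [hcut, Int.toNat_natCast, List.take_length, List.drop_length]

theorem cut_bounds (chunk : List String) (mw : Int) (hmw : 1 ≤ mw)
    (h : (chunk.length : Int) = mw) :
    1 ≤ cutScanB chunk mw chunk.length ∧ cutScanB chunk mw chunk.length ≤ mw := by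
  rw [cutScanB_spec]
  have hb := lastDotScanA_bounds chunk
  split_ifs with hL
  · omega
  · omega

theorem loopB_step (mw : Int) (fuel : Nat) (words lines : List String)
    (h : mw ≤ (words.length : Int)) :
    loopB mw (fuel + 1) words lines =
      loopB mw fuel
        (PySem.List.slice (PySem.List.slice words none (some mw))
            (some (cutScanB (PySem.List.slice words none (some mw)) mw mw.toNat)) none ++
          PySem.List.slice words (some mw) none)
        (lines ++ [PySem.Str.join " "
          (PySem.List.slice (PySem.List.slice words none (some mw)) none
            (some (cutScanB (PySem.List.slice words none (some mw)) mw mw.toNat)))]) := by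
  simp only [loopB]
  rw [if_pos h]

theorem mainB (mw : Int) (hmw : 1 ≤ mw) :
    ∀ (fuel : Nat) (ws cl lines : List String),
      (cl.length : Int) < mw → cl.length + ws.length ≤ fuel →
      (if (ws.foldl (stepA mw) (lines, cl)).2 ≠ [] then
        (ws.foldl (stepA mw) (lines, cl)).1 ++
          [PySem.Str.join " " (ws.foldl (stepA mw) (lines, cl)).2]
       else (ws.foldl (stepA mw) (lines, cl)).1) =
      loopB mw fuel (cl ++ ws) lines := by
  intro fuel
  induction fuel with
  | zero =>
    intro ws cl lines hcl hfuel
    have hcl0 : cl = [] := by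
      rw [← List.length_eq_zero_iff]; omega
    have hws0 : ws = [] := by
      rw [← List.length_eq_zero_iff]; omega
    subst hcl0; subst hws0
    simp [loopB]
  | succ fuel ih =>
    intro ws cl lines hcl hfuel
    by_cases hbig : mw ≤ ((cl ++ ws).length : Int)
    · -- a chunk of exactly mw words is completed during this pass
      have hlenapp : ((cl ++ ws).length : Int) = (cl.length : Int) + ws.length := by
        simp
      set k := (mw - (cl.length : Int)).toNat with hk
      have hk1 : 1 ≤ k := by omega
      have hkws : k ≤ ws.length := by omega
      -- decompose ws = pre ++ w :: post with |pre| = k-1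
      cases hd : ws.drop (k - 1) with
      | nil =>
        exact absurd (List.drop_eq_nil_iff.mp hd) (by omega)
      | cons w post =>
        have hws : ws = ws.take (k - 1) ++ w :: post := by
          conv_lhs => rw [← List.take_append_drop (k - 1) ws]
          rw [hd]
        have hprelen : (ws.take (k - 1)).length = k - 1 := by
          rw [List.length_take]; omega
        have hchunklen : ((((cl ++ ws.take (k - 1)) ++ [w]).length : Int)) = mw := by
          simp only [List.length_append, List.length_cons, List.length_nil, hprelen]
          push_cast
          omega
        have hcb := cut_bounds ((cl ++ ws.take (k - 1)) ++ [w]) mw hmw hchunklen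
        have hmwtoNat : mw.toNat = ((cl ++ ws.take (k - 1)) ++ [w]).length := by omega
        -- left side: A accumulates the pre-words, triggers on w, then continues on post
        conv_lhs => rw [hws]
        rw [List.foldl_append,
          innerA mw (ws.take (k - 1)) cl lines (Or.inl (by rw [hprelen]; omega)),
          List.foldl_cons, triggerA mw (cl ++ ws.take (k - 1)) w lines hchunklen]
        -- right side: B slices off exactly that chunk
        have hcw : cl ++ ws = ((cl ++ ws.take (k - 1)) ++ [w]) ++ post := by
          conv_lhs => rw [hws]
          simp
        have hpostlen : post.length = ws.length - k := by
          have := congrArg List.length hws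
          simp only [List.length_append, List.length_cons, hprelen] at this
          omega
        have hclenN : ((cl ++ ws.take (k - 1)) ++ [w]).length = cl.length + (k - 1) + 1 := by
          simp only [List.length_append, List.length_cons, List.length_nil, hprelen]
        rw [hcw, loopB_step mw fuel _ lines (by rw [← hchunklen]; simp),
          PySem.List.slice_to _ (show (0 : Int) ≤ mw by omega),
          PySem.List.slice_from _ (show (0 : Int) ≤ mw by omega),
          hmwtoNat, List.take_left, List.drop_left,
          PySem.List.slice_to _ (by omega), PySem.List.slice_from _ (by omega)]
        exact ih post _ _
          (by
            rw [List.length_drop]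
            omega)
          (by
            rw [List.length_drop]
            omega)
    · -- fewer than mw words remain: A only accumulates, both sides flush
      have hlenapp : ((cl ++ ws).length : Int) = (cl.length : Int) + ws.length := by
        simp
      rw [innerA mw ws cl lines (Or.inl (by omega))]
      simp only [loopB]
      rw [if_neg hbig]

-- ===== VERDICT (by name: the statement is the Claim_ definition above) =====
theorem split_text_by_dot_spec : Claim_equal_split_text_by_dot := by
  intro text mw _
  unfold Spec_split_text_by_dot split_text_by_dot split_text_by_dot_alt
  by_cases h : mw < 1
  · rw [if_pos h, innerA mw _ [] [] (Or.inr h)]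
    simp
  · rw [if_neg h]
    have := mainB mw (by omega) (PySem.Str.split₀ text).length (PySem.Str.split₀ text) [] []
      (by simpa using (by omega : (0:Int) < mw)) (by simp)
    simpa using this
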